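-- pv_equiv track=rewrite | github.com/prismatecas-ui/lotofacil | funcionalidades/interface_sorteios.py | _encontrar_sequencias
-- ===== SOURCE A (Python) =====
-- from typing import List, Dict, Tuple, Optional, Any
--
-- def _encontrar_sequencias(numeros_ordenados: List[int]) -> List[List[int]]:
--     """
--     Encontra sequências consecutivas nos números sorteados.
--     """
--     sequencias = []
--     sequencia_atual = [numeros_ordenados[0]]
--
--     for i in range(1, len(numeros_ordenados)):
--         if numeros_ordenados[i] == numeros_ordenados[i-1] + 1:
--             sequencia_atual.append(numeros_ordenados[i])
--         else:
--             if len(sequencia_atual) >= 2: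
--                 sequencias.append(sequencia_atual.copy())
--             sequencia_atual = [numeros_ordenados[i]]
--
--     # Verificar a última sequência
--     if len(sequencia_atual) >= 2:
--         sequencias.append(sequencia_atual)
--
--     return sequencias
-- ===== SOURCE B (Python) =====
-- def _encontrar_sequencias(numeros_ordenados):
--     # Two-pointer extraction of maximal consecutive runs: for each start i,
--     # advance j to the end of the run, slice it out if it has length >= 2.
--     sequencias = []
--     i, n = 0, len(numeros_ordenados)
--     while i < n:
--         j = i + 1
--         while j < n and numeros_ordenados[j] == numeros_ordenados[j - 1] + 1:
--             j += 1
--         if j - i >= 2: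
--             sequencias.append(numeros_ordenados[i:j])
--         i = j
--     return sequencias
-- ===== Notes on version B (the rewrite author's own statement) =====
-- stated objective: alternative
-- what changed: Replaces A's single pass with a mutable running buffer flushed at boundaries by a two-pointer scan that finds each maximal consecutive run's end index and slices the run out directly.
import Mathlib
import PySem

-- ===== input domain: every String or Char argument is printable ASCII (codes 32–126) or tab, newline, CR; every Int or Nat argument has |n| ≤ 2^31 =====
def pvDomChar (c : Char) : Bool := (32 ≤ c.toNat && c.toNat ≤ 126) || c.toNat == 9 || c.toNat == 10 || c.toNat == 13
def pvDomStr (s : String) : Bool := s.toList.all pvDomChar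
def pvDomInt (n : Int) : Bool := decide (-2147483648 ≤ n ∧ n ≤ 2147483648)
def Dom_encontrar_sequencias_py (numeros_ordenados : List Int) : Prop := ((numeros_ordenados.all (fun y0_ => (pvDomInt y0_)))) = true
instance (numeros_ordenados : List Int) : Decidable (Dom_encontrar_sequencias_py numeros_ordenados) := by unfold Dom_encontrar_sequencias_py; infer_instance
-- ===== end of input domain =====

-- B replaces A's running-buffer/flush pass by two-pointer extraction of maximal
-- consecutive runs (alternative decomposition, same O(n) cost); A raises
-- IndexError on the empty list (excluded by Pre_), where B returns [].


-- ===== PORT A =====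
-- loop body of A's `for i in range(1, len(...))`: state = (sequencias, sequencia_atual),
-- pair p = (numeros_ordenados[i-1], numeros_ordenados[i])
def pvStepA (st : List (List Int) × List Int) (p : Int × Int) : List (List Int) × List Int :=
  if p.2 = p.1 + 1 then (st.1, st.2 ++ [p.2])
  else (if 2 ≤ st.2.length then st.1 ++ [st.2] else st.1, [p.2])

def encontrar_sequencias_py (numeros_ordenados : List Int) : List (List Int) :=
  match numeros_ordenados with
  | [] => []   -- unreachable under Pre_: A raises IndexError reading numeros_ordenados[0]
  | x :: rest =>
    let st := ((x :: rest).zip rest).foldl pvStepA ([], [x])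
    if 2 ≤ st.2.length then st.1 ++ [st.2] else st.1

-- ===== PORT B =====
-- inner while loop of B: from previous value `prev`, consume the consecutive
-- continuation, returning (run continuation, remainder of the list)
def pvTakeRun (prev : Int) (xs : List Int) : List Int × List Int :=
  match xs with
  | [] => ([], [])
  | y :: ys => if y = prev + 1 then
      let pr := pvTakeRun y ys
      (y :: pr.1, pr.2)
    else ([], y :: ys)

-- termination helper for the outer loop (cited by decreasing_by below)
theorem pvTakeRun_len (prev : Int) (xs : List Int) : (pvTakeRun prev xs).2.length ≤ xs.length := by
  induction xs generalizing prev with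
  | nil => simp [pvTakeRun]
  | cons y ys ih =>
    simp only [pvTakeRun]
    split
    · exact Nat.le_succ_of_le (ih y)
    · simp

-- outer while loop of B: each iteration slices out one maximal run (x :: pr.1)
def encontrar_sequencias_py_alt (numeros_ordenados : List Int) : List (List Int) :=
  match numeros_ordenados with
  | [] => []
  | x :: rest =>
    let pr := pvTakeRun x rest
    (if 2 ≤ (x :: pr.1).length then [x :: pr.1] else []) ++ encontrar_sequencias_py_alt pr.2
termination_by numeros_ordenados.length
decreasing_by simpa using Nat.lt_succ_of_le (pvTakeRun_len x rest)

-- ===== PRECONDITION & SPEC =====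
-- Pre_ excludes exactly the empty list, on which A raises IndexError.
def Pre_encontrar_sequencias_py (numeros_ordenados : List Int) : Prop := numeros_ordenados ≠ []
instance (numeros_ordenados : List Int) : Decidable (Pre_encontrar_sequencias_py numeros_ordenados) := by unfold Pre_encontrar_sequencias_py; infer_instance
def pvWitness_encontrar_sequencias_py : List Int := [1, 2, 3, 5, 6, 9]

def Spec_encontrar_sequencias_py (numeros_ordenados : List Int) (out : List (List Int)) : Prop := out = encontrar_sequencias_py_alt numeros_ordenados
instance (numeros_ordenados : List Int) (out : List (List Int)) : Decidable (Spec_encontrar_sequencias_py numeros_ordenados out) := by unfold Spec_encontrar_sequencias_py; infer_instance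

-- ===== CLAIM (what is proved, stated in full; the proofs are below) =====
def Claim_equal_encontrar_sequencias_py : Prop := ∀ (numeros_ordenados : List Int), Dom_encontrar_sequencias_py numeros_ordenados → Pre_encontrar_sequencias_py numeros_ordenados → Spec_encontrar_sequencias_py numeros_ordenados (encontrar_sequencias_py numeros_ordenados)

-- ===== LEMMAS AND PROOFS =====

-- A's loop written as explicit recursion on the remaining list with the
-- accumulator (seqs, cur) and explicit previous element `prev`.
def pvAfold (prev : Int) (rest : List Int) (seqs : List (List Int)) (cur : List Int) : List (List Int) :=
  match rest with
  | [] => if 2 ≤ cur.length then seqs ++ [cur] else seqs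
  | y :: ys =>
    if y = prev + 1 then pvAfold y ys seqs (cur ++ [y])
    else pvAfold y ys (if 2 ≤ cur.length then seqs ++ [cur] else seqs) [y]

theorem pvFold_eq_Afold (rest : List Int) : ∀ (prev : Int) (seqs : List (List Int)) (cur : List Int),
    (let st := ((prev :: rest).zip rest).foldl pvStepA (seqs, cur);
     if 2 ≤ st.2.length then st.1 ++ [st.2] else st.1) = pvAfold prev rest seqs cur := by
  induction rest with
  | nil => intro prev seqs cur; simp [pvAfold]
  | cons y ys ih =>
    intro prev seqs cur
    simp only [List.zip_cons_cons, List.foldl_cons, pvAfold, pvStepA]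
    by_cases h : y = prev + 1
    · simpa [h] using ih y seqs (cur ++ [y])
    · simpa [h] using ih y (if 2 ≤ cur.length then seqs ++ [cur] else seqs) [y]

-- core invariant: A's fold from state (seqs, cur) equals seqs followed by the
-- runs B extracts, with the current run cur extended by the consecutive prefix.
theorem pvAfold_eq_alt (rest : List Int) : ∀ (prev : Int) (seqs : List (List Int)) (cur : List Int),
    pvAfold prev rest seqs cur =
      seqs ++ ((if 2 ≤ (cur ++ (pvTakeRun prev rest).1).length then [cur ++ (pvTakeRun prev rest).1] else [])
               ++ encontrar_sequencias_py_alt (pvTakeRun prev rest).2) := by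
  induction rest with
  | nil =>
    intro prev seqs cur
    simp only [pvAfold, pvTakeRun, encontrar_sequencias_py_alt, List.append_nil]
    split_ifs <;> simp
  | cons y ys ih =>
    intro prev seqs cur
    simp only [pvAfold, pvTakeRun]
    by_cases h : y = prev + 1
    · simp only [if_pos h]
      simpa using ih y seqs (cur ++ [y])
    · simp only [if_neg h]
      rw [ih y _ [y]]
      rw [encontrar_sequencias_py_alt]
      simp only [List.singleton_append]
      split_ifs <;> simp_all <;> omega

-- ===== VERDICT (by name: the statement is the Claim_ definition above) =====
theorem encontrar_sequencias_py_spec : Claim_equal_encontrar_sequencias_py := by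
  intro xs _ hpre
  unfold Spec_encontrar_sequencias_py
  match xs with
  | [] => exact absurd rfl hpre
  | x :: rest =>
    show (let st := ((x :: rest).zip rest).foldl pvStepA ([], [x]);
          if 2 ≤ st.2.length then st.1 ++ [st.2] else st.1) = _
    rw [pvFold_eq_Afold, pvAfold_eq_alt]
    rw [encontrar_sequencias_py_alt]
    simp
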